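-- pv_equiv track=rewrite | github.com/BVasilevski/DIANS_Project | Domasna 1/Scripts/filter_data.py | change_working_hours_to_mk
-- ===== SOURCE A (Python) =====
-- def change_working_hours_to_mk(input_line: list):
--     new_line = []
--     translation_dictionary = {'Mo': 'Пон', 'Tu': 'Вто', 'We': 'Сре', 'Th': 'Чет', 'Fr': 'Пет',
--                               'Sa': 'Саб',
--                               'Su': 'Нед'}
--     for element in input_line:
--         for translation in translation_dictionary:
--             if element.find(translation) != -1:
--                 element = element.replace(translation, translation_dictionary[translation])
--         new_line.append(element)
--     return new_line
-- ===== SOURCE B (Python) =====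
-- import re
--
-- def change_working_hours_to_mk(input_line: list):
--     translation_dictionary = {'Mo': 'Пон', 'Tu': 'Вто', 'We': 'Сре', 'Th': 'Чет', 'Fr': 'Пет',
--                               'Sa': 'Саб',
--                               'Su': 'Нед'}
--     pattern = re.compile('|'.join(map(re.escape, translation_dictionary)))
--     return [pattern.sub(lambda m: translation_dictionary[m.group()], element)
--             for element in input_line]
-- ===== Notes on version B (the rewrite author's own statement) =====
-- stated objective: idiomatic
-- what changed: Replaced the seven sequential full-string find/replace passes per element with one compiled regex alternation that translates every day abbreviation in a single left-to-right scan, returned via a list comprehension.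
import Mathlib
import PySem

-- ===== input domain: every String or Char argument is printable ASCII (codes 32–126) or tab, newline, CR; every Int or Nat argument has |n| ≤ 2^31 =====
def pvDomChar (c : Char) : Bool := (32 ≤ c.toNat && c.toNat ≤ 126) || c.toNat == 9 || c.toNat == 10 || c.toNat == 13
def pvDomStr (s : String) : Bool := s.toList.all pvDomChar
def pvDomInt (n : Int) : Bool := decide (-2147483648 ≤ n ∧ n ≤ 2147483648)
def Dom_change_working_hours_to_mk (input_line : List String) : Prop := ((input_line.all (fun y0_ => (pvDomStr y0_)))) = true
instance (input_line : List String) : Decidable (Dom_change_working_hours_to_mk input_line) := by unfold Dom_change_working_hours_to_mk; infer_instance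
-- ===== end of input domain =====

-- B replaces A's seven sequential find/replace passes per string with a single left-to-right
-- scan (a compiled regex alternation in Python); proved to return the same list of strings.


-- ===== PORT A =====
-- 'for translation in translation_dictionary: … translation_dictionary[translation]' is ported as a
-- fold over the dict's items (same keys in the same insertion order; the lookup always succeeds).
def change_working_hours_to_mk (input_line : List String) : List String :=
  let translation_dictionary : PySem.Dict String String :=
    PySem.Dict.ofList [("Mo", "Пон"), ("Tu", "Вто"), ("We", "Сре"), ("Th", "Чет"),
                       ("Fr", "Пет"), ("Sa", "Саб"), ("Su", "Нед")]
  input_line.foldl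
    (fun new_line element =>
      new_line ++ [translation_dictionary.items.foldl
        (fun element kv =>
          if PySem.Str.find element kv.1 ≠ -1 then PySem.Str.replace element kv.1 kv.2
          else element) element]) []

-- ===== PORT B =====
-- Hand-port of Source B's compiled regex 'Mo|Tu|We|Th|Fr|Sa|Su' with dict-lookup substitution:
-- re.sub scans the string once, left to right, trying the alternatives in order at each
-- position; since every alternative is a two-character literal, that is exactly this scan.
def pvMatch (c1 c2 : Char) : Option (List Char) :=
  if c1 = 'M' ∧ c2 = 'o' then some "Пон".toList
  else if c1 = 'T' ∧ c2 = 'u' then some "Вто".toList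
  else if c1 = 'W' ∧ c2 = 'e' then some "Сре".toList
  else if c1 = 'T' ∧ c2 = 'h' then some "Чет".toList
  else if c1 = 'F' ∧ c2 = 'r' then some "Пет".toList
  else if c1 = 'S' ∧ c2 = 'a' then some "Саб".toList
  else if c1 = 'S' ∧ c2 = 'u' then some "Нед".toList
  else none

def pvSub : List Char → List Char
  | [] => []
  | [c] => [c]
  | c1 :: c2 :: rest =>
    match pvMatch c1 c2 with
    | some v => v ++ pvSub rest
    | none => c1 :: pvSub (c2 :: rest)
termination_by l => l.length
decreasing_by all_goals (simp; try omega)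

def change_working_hours_to_mk_alt (input_line : List String) : List String :=
  input_line.map (fun element => String.ofList (pvSub element.toList))

-- ===== PRECONDITION & SPEC =====
def Spec_change_working_hours_to_mk (input_line : List String) (out : List String) : Prop := out = change_working_hours_to_mk_alt input_line
instance (input_line : List String) (out : List String) : Decidable (Spec_change_working_hours_to_mk input_line out) := by unfold Spec_change_working_hours_to_mk; infer_instance

-- ===== CLAIM (what is proved, stated in full; the proofs are below) =====
def Claim_equal_change_working_hours_to_mk : Prop := ∀ (input_line : List String), Dom_change_working_hours_to_mk input_line → Spec_change_working_hours_to_mk input_line (change_working_hours_to_mk input_line)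

-- ===== LEMMAS AND PROOFS =====

-- Fuel-free model of PySem.Chars.replace (for a nonempty pattern).
def pvRep (old new : List Char) : List Char → List Char
  | [] => []
  | c :: t =>
    if old.isPrefixOf (c :: t) then new ++ pvRep old new (t.drop (old.length - 1))
    else c :: pvRep old new t
termination_by l => l.length
decreasing_by all_goals (simp; try omega)

theorem pvRep_go (old new : List Char) (h : old ≠ []) :
    ∀ (fuel : Nat) (l acc : List Char), l.length ≤ fuel →
      PySem.Chars.replace.go old new fuel l acc = acc.reverse ++ pvRep old new l := by
  intro fuel
  induction fuel with
  | zero =>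
    intro l acc hl
    have hnil : l = [] := by cases l <;> simp_all
    subst hnil
    simp [PySem.Chars.replace.go, pvRep]
  | succ fuel ih =>
    intro l acc hl
    cases l with
    | nil => simp [PySem.Chars.replace.go, pvRep]
    | cons c t =>
      rw [PySem.Chars.replace.go]
      by_cases hp : old.isPrefixOf (c :: t) = true
      · obtain ⟨o, os, rfl⟩ : ∃ o os, old = o :: os := by
          cases old with
          | nil => exact absurd rfl h
          | cons o os => exact ⟨o, os, rfl⟩
        simp only [hp, if_true]
        rw [ih _ _ (by simp at hl ⊢; omega)]
        rw [pvRep, if_pos hp]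
        simp
      · rw [if_neg hp]
        rw [ih _ _ (by simp at hl ⊢; omega)]
        rw [pvRep, if_neg hp]
        simp

theorem replace_eq_pvRep (s old new : List Char) (h : old ≠ []) :
    PySem.Chars.replace s old new = pvRep old new s := by
  have he : old.isEmpty = false := by simpa using h
  simp only [PySem.Chars.replace, he, Bool.false_eq_true, if_false]
  rw [pvRep_go old new h s.length s [] (le_refl _)]
  simp

theorem pvRep_not_infix (k v : List Char) :
    ∀ s : List Char, ¬ k <:+: s → pvRep k v s = s := by
  intro s
  induction s with
  | nil => intro _; rw [pvRep]
  | cons c t ih =>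
    intro hin
    have hin' : ¬ k <:+: t := fun hh => hin (List.infix_cons hh)
    rw [pvRep, if_neg (fun hp => hin (List.isPrefixOf_iff_prefix.mp hp).isInfix)]
    rw [ih hin']

-- One replace step of A's inner loop (guard included) = pvRep, on the String level.
theorem stepStr (s k v : String) (hk : k.toList ≠ []) :
    (if PySem.Str.find s k ≠ -1 then PySem.Str.replace s k v else s)
      = String.ofList (pvRep k.toList v.toList s.toList) := by
  by_cases hf : PySem.Str.find s k = -1
  · have hf' : PySem.Chars.find s.toList k.toList = -1 := by
      rw [← PySem.Str.find_eq]; exact hf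
    have hni : ¬ k.toList <:+: s.toList := (PySem.Chars.find_eq_neg_one_iff _ _).mp hf'
    rw [if_neg (fun hcon => hcon hf)]
    rw [pvRep_not_infix _ _ _ hni, String.ofList_toList]
  · rw [if_pos hf]
    show String.ofList (PySem.Chars.replace s.toList k.toList v.toList) = _
    rw [replace_eq_pvRep _ _ _ hk]

-- A's seven-pass transformation on the character level.
def chainA (l : List Char) : List Char :=
  pvRep ['S','u'] "Нед".toList (pvRep ['S','a'] "Саб".toList (pvRep ['F','r'] "Пет".toList
    (pvRep ['T','h'] "Чет".toList (pvRep ['W','e'] "Сре".toList (pvRep ['T','u'] "Вто".toList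
      (pvRep ['M','o'] "Пон".toList l))))))

theorem isPrefixOf_pair (a b c : Char) (X : List Char) :
    List.isPrefixOf [a, b] (c :: X) = true ↔ a = c ∧ X.head? = some b := by
  rw [List.isPrefixOf_iff_prefix, List.cons_prefix_cons]
  cases X with
  | nil => simp
  | cons d t => simp [List.cons_prefix_cons, eq_comm]

theorem pvRep_cons_safe (a b : Char) (v : List Char) (c : Char) (X : List Char)
    (h : ¬ (a = c ∧ X.head? = some b)) :
    pvRep [a, b] v (c :: X) = c :: pvRep [a, b] v X := by
  rw [pvRep, if_neg (fun hp => h ((isPrefixOf_pair a b c X).mp hp))]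

theorem pvRep_skip2 (a b : Char) (v : List Char) (c1 c2 : Char) (X : List Char)
    (h1 : ¬ (a = c1 ∧ b = c2)) (h2 : a ≠ c2) :
    pvRep [a, b] v (c1 :: c2 :: X) = c1 :: c2 :: pvRep [a, b] v X := by
  rw [pvRep_cons_safe _ _ _ _ _ (by rintro ⟨ha, hh⟩; simp only [List.head?_cons, Option.some_inj] at hh; exact h1 ⟨ha, hh.symm⟩),
      pvRep_cons_safe _ _ _ _ _ (by rintro ⟨ha, -⟩; exact h2 ha)]

theorem pvRep_match (a b : Char) (v : List Char) (X : List Char) :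
    pvRep [a, b] v (a :: b :: X) = v ++ pvRep [a, b] v X := by
  rw [pvRep, if_pos (by simp [List.isPrefixOf])]
  simp

theorem pvRep_append_safe (a b : Char) (v : List Char) (p x : List Char)
    (h : ∀ c ∈ p, c ≠ a) :
    pvRep [a, b] v (p ++ x) = p ++ pvRep [a, b] v x := by
  induction p with
  | nil => simp
  | cons c p ih =>
    have hca : ¬ (a = c ∧ (p ++ x).head? = some b) := by
      rintro ⟨hac, -⟩; exact h c (by simp) hac.symm
    simp only [List.cons_append]
    rw [pvRep_cons_safe _ _ _ _ _ hca, ih (fun d hd => h d (by simp [hd]))]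

-- pvRep keeps the head or replaces it by the head of the (nonempty) replacement.
theorem pvRep_head (a b : Char) (v : List Char) (hv : v ≠ []) (X : List Char) :
    (pvRep [a, b] v X).head? = X.head? ∨ (pvRep [a, b] v X).head? = v.head? := by
  cases X with
  | nil => left; rw [pvRep]
  | cons c t =>
    rw [pvRep]
    by_cases hp : List.isPrefixOf [a, b] (c :: t) = true
    · right
      rw [if_pos hp]
      cases v with
      | nil => exact absurd rfl hv
      | cons vh vt => simp
    · left
      rw [if_neg hp]
      simp

-- The heads of the seven replacement strings.
def pvCyr : List Char := ['П', 'В', 'С', 'Ч', 'Н']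

-- Head of an intermediate string in A's pass chain: the original character, or Cyrillic.
def pvGoodHead (c : Char) (X : List Char) : Prop :=
  X.head? = some c ∨ ∃ z, X.head? = some z ∧ z ∈ pvCyr

theorem pvGood_preserved (a b : Char) (v : List Char) (hd : Char)
    (hv : v.head? = some hd) (hcyr : hd ∈ pvCyr) (c : Char) (X : List Char)
    (hg : pvGoodHead c X) : pvGoodHead c (pvRep [a, b] v X) := by
  have hvne : v ≠ [] := by intro hh; subst hh; simp at hv
  rcases pvRep_head a b v hvne X with h | h
  · rw [pvGoodHead, h]; exact hg
  · right; exact ⟨hd, by rw [h, hv], hcyr⟩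

theorem pvSafe_of_good (a b c1 c2 : Char) (hb : b ∉ pvCyr)
    (hne : ¬ (c1 = a ∧ c2 = b)) (Z : List Char) (hg : pvGoodHead c2 Z) :
    ¬ (a = c1 ∧ Z.head? = some b) := by
  rintro ⟨rfl, h2⟩
  rcases hg with hgc | ⟨z, hz, hzc⟩
  · rw [h2] at hgc
    exact hne ⟨rfl, (Option.some_inj.mp hgc).symm⟩
  · rw [h2] at hz
    have hzb : z = b := (Option.some_inj.mp hz).symm
    exact hb (hzb ▸ hzc)

-- Key step: A's seven passes act on the first two characters exactly as B's scan does.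
theorem chainA_step (c1 c2 : Char) (X : List Char) :
    chainA (c1 :: c2 :: X) =
      match pvMatch c1 c2 with
      | some v => v ++ chainA X
      | none => c1 :: chainA (c2 :: X) := by
  by_cases h1 : c1 = 'M' ∧ c2 = 'o'
  · obtain ⟨rfl, rfl⟩ := h1
    show chainA _ = "Пон".toList ++ chainA X
    unfold chainA
    rw [pvRep_match 'M' 'o' "Пон".toList]
    rw [pvRep_append_safe 'T' 'u' "Вто".toList "Пон".toList _ (by simp)]
    rw [pvRep_append_safe 'W' 'e' "Сре".toList "Пон".toList _ (by simp)]
    rw [pvRep_append_safe 'T' 'h' "Чет".toList "Пон".toList _ (by simp)]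
    rw [pvRep_append_safe 'F' 'r' "Пет".toList "Пон".toList _ (by simp)]
    rw [pvRep_append_safe 'S' 'a' "Саб".toList "Пон".toList _ (by simp)]
    rw [pvRep_append_safe 'S' 'u' "Нед".toList "Пон".toList _ (by simp)]
  by_cases h2 : c1 = 'T' ∧ c2 = 'u'
  · obtain ⟨rfl, rfl⟩ := h2
    show chainA _ = "Вто".toList ++ chainA X
    unfold chainA
    rw [pvRep_skip2 'M' 'o' "Пон".toList 'T' 'u' _ (by decide) (by decide)]
    rw [pvRep_match 'T' 'u' "Вто".toList]
    rw [pvRep_append_safe 'W' 'e' "Сре".toList "Вто".toList _ (by simp)]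
    rw [pvRep_append_safe 'T' 'h' "Чет".toList "Вто".toList _ (by simp)]
    rw [pvRep_append_safe 'F' 'r' "Пет".toList "Вто".toList _ (by simp)]
    rw [pvRep_append_safe 'S' 'a' "Саб".toList "Вто".toList _ (by simp)]
    rw [pvRep_append_safe 'S' 'u' "Нед".toList "Вто".toList _ (by simp)]
  by_cases h3 : c1 = 'W' ∧ c2 = 'e'
  · obtain ⟨rfl, rfl⟩ := h3
    show chainA _ = "Сре".toList ++ chainA X
    unfold chainA
    rw [pvRep_skip2 'M' 'o' "Пон".toList 'W' 'e' _ (by decide) (by decide)]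
    rw [pvRep_skip2 'T' 'u' "Вто".toList 'W' 'e' _ (by decide) (by decide)]
    rw [pvRep_match 'W' 'e' "Сре".toList]
    rw [pvRep_append_safe 'T' 'h' "Чет".toList "Сре".toList _ (by simp)]
    rw [pvRep_append_safe 'F' 'r' "Пет".toList "Сре".toList _ (by simp)]
    rw [pvRep_append_safe 'S' 'a' "Саб".toList "Сре".toList _ (by simp)]
    rw [pvRep_append_safe 'S' 'u' "Нед".toList "Сре".toList _ (by simp)]
  by_cases h4 : c1 = 'T' ∧ c2 = 'h'
  · obtain ⟨rfl, rfl⟩ := h4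
    show chainA _ = "Чет".toList ++ chainA X
    unfold chainA
    rw [pvRep_skip2 'M' 'o' "Пон".toList 'T' 'h' _ (by decide) (by decide)]
    rw [pvRep_skip2 'T' 'u' "Вто".toList 'T' 'h' _ (by decide) (by decide)]
    rw [pvRep_skip2 'W' 'e' "Сре".toList 'T' 'h' _ (by decide) (by decide)]
    rw [pvRep_match 'T' 'h' "Чет".toList]
    rw [pvRep_append_safe 'F' 'r' "Пет".toList "Чет".toList _ (by simp)]
    rw [pvRep_append_safe 'S' 'a' "Саб".toList "Чет".toList _ (by simp)]
    rw [pvRep_append_safe 'S' 'u' "Нед".toList "Чет".toList _ (by simp)]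
  by_cases h5 : c1 = 'F' ∧ c2 = 'r'
  · obtain ⟨rfl, rfl⟩ := h5
    show chainA _ = "Пет".toList ++ chainA X
    unfold chainA
    rw [pvRep_skip2 'M' 'o' "Пон".toList 'F' 'r' _ (by decide) (by decide)]
    rw [pvRep_skip2 'T' 'u' "Вто".toList 'F' 'r' _ (by decide) (by decide)]
    rw [pvRep_skip2 'W' 'e' "Сре".toList 'F' 'r' _ (by decide) (by decide)]
    rw [pvRep_skip2 'T' 'h' "Чет".toList 'F' 'r' _ (by decide) (by decide)]
    rw [pvRep_match 'F' 'r' "Пет".toList]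
    rw [pvRep_append_safe 'S' 'a' "Саб".toList "Пет".toList _ (by simp)]
    rw [pvRep_append_safe 'S' 'u' "Нед".toList "Пет".toList _ (by simp)]
  by_cases h6 : c1 = 'S' ∧ c2 = 'a'
  · obtain ⟨rfl, rfl⟩ := h6
    show chainA _ = "Саб".toList ++ chainA X
    unfold chainA
    rw [pvRep_skip2 'M' 'o' "Пон".toList 'S' 'a' _ (by decide) (by decide)]
    rw [pvRep_skip2 'T' 'u' "Вто".toList 'S' 'a' _ (by decide) (by decide)]
    rw [pvRep_skip2 'W' 'e' "Сре".toList 'S' 'a' _ (by decide) (by decide)]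
    rw [pvRep_skip2 'T' 'h' "Чет".toList 'S' 'a' _ (by decide) (by decide)]
    rw [pvRep_skip2 'F' 'r' "Пет".toList 'S' 'a' _ (by decide) (by decide)]
    rw [pvRep_match 'S' 'a' "Саб".toList]
    rw [pvRep_append_safe 'S' 'u' "Нед".toList "Саб".toList _ (by simp)]
  by_cases h7 : c1 = 'S' ∧ c2 = 'u'
  · obtain ⟨rfl, rfl⟩ := h7
    show chainA _ = "Нед".toList ++ chainA X
    unfold chainA
    rw [pvRep_skip2 'M' 'o' "Пон".toList 'S' 'u' _ (by decide) (by decide)]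
    rw [pvRep_skip2 'T' 'u' "Вто".toList 'S' 'u' _ (by decide) (by decide)]
    rw [pvRep_skip2 'W' 'e' "Сре".toList 'S' 'u' _ (by decide) (by decide)]
    rw [pvRep_skip2 'T' 'h' "Чет".toList 'S' 'u' _ (by decide) (by decide)]
    rw [pvRep_skip2 'F' 'r' "Пет".toList 'S' 'u' _ (by decide) (by decide)]
    rw [pvRep_skip2 'S' 'a' "Саб".toList 'S' 'u' _ (by decide) (by decide)]
    rw [pvRep_match 'S' 'u' "Нед".toList]
  have hm : pvMatch c1 c2 = none := by
    rw [pvMatch, if_neg h1, if_neg h2, if_neg h3, if_neg h4, if_neg h5, if_neg h6, if_neg h7]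
  rw [hm]
  show chainA _ = c1 :: chainA (c2 :: X)
  have g1 : pvGoodHead c2 (c2 :: X) := Or.inl rfl
  have g2 := pvGood_preserved 'M' 'o' "Пон".toList 'П' rfl (by decide) c2 _ g1
  have g3 := pvGood_preserved 'T' 'u' "Вто".toList 'В' rfl (by decide) c2 _ g2
  have g4 := pvGood_preserved 'W' 'e' "Сре".toList 'С' rfl (by decide) c2 _ g3
  have g5 := pvGood_preserved 'T' 'h' "Чет".toList 'Ч' rfl (by decide) c2 _ g4
  have g6 := pvGood_preserved 'F' 'r' "Пет".toList 'П' rfl (by decide) c2 _ g5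
  have g7 := pvGood_preserved 'S' 'a' "Саб".toList 'С' rfl (by decide) c2 _ g6
  unfold chainA
  rw [pvRep_cons_safe 'M' 'o' "Пон".toList c1 _ (pvSafe_of_good 'M' 'o' c1 c2 (by decide) h1 _ g1),
      pvRep_cons_safe 'T' 'u' "Вто".toList c1 _ (pvSafe_of_good 'T' 'u' c1 c2 (by decide) h2 _ g2),
      pvRep_cons_safe 'W' 'e' "Сре".toList c1 _ (pvSafe_of_good 'W' 'e' c1 c2 (by decide) h3 _ g3),
      pvRep_cons_safe 'T' 'h' "Чет".toList c1 _ (pvSafe_of_good 'T' 'h' c1 c2 (by decide) h4 _ g4),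
      pvRep_cons_safe 'F' 'r' "Пет".toList c1 _ (pvSafe_of_good 'F' 'r' c1 c2 (by decide) h5 _ g5),
      pvRep_cons_safe 'S' 'a' "Саб".toList c1 _ (pvSafe_of_good 'S' 'a' c1 c2 (by decide) h6 _ g6),
      pvRep_cons_safe 'S' 'u' "Нед".toList c1 _ (pvSafe_of_good 'S' 'u' c1 c2 (by decide) h7 _ g7)]

theorem chainA_nil : chainA [] = [] := by
  simp only [chainA]
  rw [pvRep, pvRep, pvRep, pvRep, pvRep, pvRep, pvRep]

theorem chainA_single (c : Char) : chainA [c] = [c] := by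
  have h : ∀ (a b : Char) (v : List Char), pvRep [a, b] v [c] = [c] := by
    intro a b v
    rw [pvRep_cons_safe _ _ _ _ _ (by simp), pvRep]
  simp only [chainA]
  rw [h, h, h, h, h, h, h]

theorem chainA_eq_pvSub : ∀ l : List Char, chainA l = pvSub l := by
  intro l
  induction l using pvSub.induct with
  | case1 => rw [chainA_nil, pvSub]
  | case2 c => rw [chainA_single, pvSub]
  | case3 c1 c2 rest v hm ih =>
    rw [chainA_step, hm, ih, pvSub, hm]
  | case4 c1 c2 rest hm ih =>
    rw [chainA_step, hm, ih, pvSub, hm]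

theorem foldl_append_map {α β : Type} (f : α → β) :
    ∀ (xs : List α) (acc : List β),
      xs.foldl (fun nl e => nl ++ [f e]) acc = acc ++ xs.map f := by
  intro xs
  induction xs with
  | nil => intro acc; simp
  | cons x xs ih => intro acc; simp [List.foldl, ih]

theorem applyA_eq (s : String) :
    ([("Mo", "Пон"), ("Tu", "Вто"), ("We", "Сре"), ("Th", "Чет"), ("Fr", "Пет"),
      ("Sa", "Саб"), ("Su", "Нед")] : List (String × String)).foldl
      (fun element kv =>
        if PySem.Str.find element kv.1 ≠ -1 then PySem.Str.replace element kv.1 kv.2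
        else element) s
      = String.ofList (chainA s.toList) := by
  simp only [List.foldl]
  rw [stepStr _ "Su" "Нед" (by decide), stepStr _ "Sa" "Саб" (by decide),
      stepStr _ "Fr" "Пет" (by decide), stepStr _ "Th" "Чет" (by decide),
      stepStr _ "We" "Сре" (by decide), stepStr _ "Tu" "Вто" (by decide),
      stepStr _ "Mo" "Пон" (by decide)]
  simp only [String.toList_ofList]
  rfl

-- ===== VERDICT (by name: the statement is the Claim_ definition above) =====
theorem change_working_hours_to_mk_spec : Claim_equal_change_working_hours_to_mk := by
  intro input_line _
  unfold Spec_change_working_hours_to_mk change_working_hours_to_mk change_working_hours_to_mk_alt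
  have hitems : (PySem.Dict.ofList
      ([("Mo", "Пон"), ("Tu", "Вто"), ("We", "Сре"), ("Th", "Чет"), ("Fr", "Пет"),
        ("Sa", "Саб"), ("Su", "Нед")] : List (String × String))).items
      = [("Mo", "Пон"), ("Tu", "Вто"), ("We", "Сре"), ("Th", "Чет"), ("Fr", "Пет"),
         ("Sa", "Саб"), ("Su", "Нед")] := by decide
  simp only [hitems]
  rw [foldl_append_map]
  simp only [List.nil_append]
  apply List.map_congr_left
  intro s _
  rw [applyA_eq, chainA_eq_pvSub]
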